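-- pv_equiv track=rewrite | github.com/pypi-data/pypi-mirror-314 | packages/REMI-z/remi_z-0.5.9.tar.gz/remi_z-0.5.9/remi_z/legacy_tokenizer.py | get_inst_from_input_seq
-- ===== SOURCE A (Python) =====
-- def get_inst_from_input_seq(inp_seq):
--     input_list = inp_seq
--
--     # 初始化结果列表和临时子列表
--     result = []
--     current_sublist = []
--
--     for item in input_list:
--         if item.startswith('i-'):
--             # 如果遇到以'i-'开头的元素，将它加入sub list
--             current_sublist.append(item)
--         else:  # 如果元素不以i开头，那么将sub list加入result
--             if len(current_sublist) > 0:
--                 result.append(current_sublist)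
--                 current_sublist = []
--
--     # 循环结束后，如果当前子列表非空，将其添加到结果中
--     if len(current_sublist) > 0:
--         result.append(current_sublist)
--
--     return result
-- ===== SOURCE B (Python) =====
-- def get_inst_from_input_seq(inp_seq):
--     # Build the result back-to-front: scan the sequence reversed and prepend
--     # each 'i-' item into the front group (or open a new front group).
--     result = []
--     run_open = False
--     for item in reversed(inp_seq):
--         if item.startswith('i-'):
--             if run_open:
--                 result[0].insert(0, item)
--             else:
--                 result.insert(0, [item])
--                 run_open = True
--         else:
--             run_open = False
--     return result
-- ===== Notes on version B (the rewrite author's own statement) =====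
-- stated objective: alternative
-- what changed: Builds the output back-to-front: scans the reversed sequence prepending each 'i-' item into the current front group, so there is no pending-sublist accumulator and no post-loop flush.
import Mathlib
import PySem

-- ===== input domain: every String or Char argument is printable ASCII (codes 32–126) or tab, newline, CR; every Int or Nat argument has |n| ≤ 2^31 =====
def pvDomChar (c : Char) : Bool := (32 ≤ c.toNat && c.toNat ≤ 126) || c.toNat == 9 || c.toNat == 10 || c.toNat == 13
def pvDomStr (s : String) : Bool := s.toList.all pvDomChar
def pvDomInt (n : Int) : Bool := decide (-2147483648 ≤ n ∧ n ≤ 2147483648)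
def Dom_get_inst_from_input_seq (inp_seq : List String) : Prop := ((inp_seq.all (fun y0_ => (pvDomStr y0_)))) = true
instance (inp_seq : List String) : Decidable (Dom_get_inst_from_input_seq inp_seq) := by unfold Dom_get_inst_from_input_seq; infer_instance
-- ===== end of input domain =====

-- B builds the output back-to-front (reversed scan, prepending into the front group)
-- instead of A's forward accumulator with a post-loop flush (alternative decomposition).

-- ===== PORT A =====
-- A's for-loop over input_list with state (result, current_sublist), then the final flush.
def pvGoA : List String → List (List String) → List String → List (List String)
  | [], result, cur => if cur.length > 0 then result ++ [cur] else result
  | x :: xs, result, cur =>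
    if PySem.Str.startswith x "i-" then
      pvGoA xs result (cur ++ [x])
    else
      pvGoA xs (if cur.length > 0 then result ++ [cur] else result) []

def get_inst_from_input_seq (inp_seq : List String) : List (List String) :=
  pvGoA inp_seq [] []

-- ===== PORT B =====
-- B's loop body: state is (run_open, result); result[0].insert(0, item) prepends into the
-- front group (run_open guarantees result is nonempty there, ported as headD []/tail).
def pvStepB (st : Bool × List (List String)) (item : String) : Bool × List (List String) :=
  if PySem.Str.startswith item "i-" then
    if st.1 then (true, (item :: st.2.headD []) :: st.2.tail)
    else (true, [item] :: st.2)
  else (false, st.2)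

def get_inst_from_input_seq_alt (inp_seq : List String) : List (List String) :=
  (inp_seq.reverse.foldl pvStepB (false, [])).2

-- ===== PRECONDITION & SPEC =====
def Spec_get_inst_from_input_seq (inp_seq : List String) (out : List (List String)) : Prop := out = get_inst_from_input_seq_alt inp_seq
instance (inp_seq : List String) (out : List (List String)) : Decidable (Spec_get_inst_from_input_seq inp_seq out) := by unfold Spec_get_inst_from_input_seq; infer_instance

-- ===== CLAIM (what is proved, stated in full; the proofs are below) =====
def Claim_equal_get_inst_from_input_seq : Prop := ∀ (inp_seq : List String), Dom_get_inst_from_input_seq inp_seq → Spec_get_inst_from_input_seq inp_seq (get_inst_from_input_seq inp_seq)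

-- ===== LEMMAS AND PROOFS =====

-- maximal consecutive runs tagged with their key (proof-side characterisation)
def pvRuns : List String → List (Bool × List String)
  | [] => []
  | x :: xs =>
    let k := PySem.Str.startswith x "i-"
    match pvRuns xs with
    | (k', g) :: rest => if k' = k then (k, x :: g) :: rest else (k, [x]) :: (k', g) :: rest
    | [] => [(k, [x])]

-- the selected (True-key) groups
def pvSel (rs : List (Bool × List String)) : List (List String) :=
  rs.filterMap (fun p => if p.1 then some p.2 else none)

-- what A's loop produces from pending sublist `cur` and the runs of the rest
def pvFlush (cur : List String) (rs : List (Bool × List String)) : List (List String) :=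
  match rs with
  | (true, g) :: rest => if cur = [] then g :: pvSel rest else (cur ++ g) :: pvSel rest
  | _ => if cur = [] then pvSel rs else cur :: pvSel rs

lemma pvFlush_nil (rs : List (Bool × List String)) : pvFlush [] rs = pvSel rs := by
  rcases rs with _ | ⟨⟨k, g⟩, rest⟩
  · rfl
  · cases k <;> simp [pvFlush, pvSel]

lemma pvGoA_eq (xs : List String) : ∀ (res : List (List String)) (cur : List String),
    pvGoA xs res cur = res ++ pvFlush cur (pvRuns xs) := by
  induction xs with
  | nil =>
    intro res cur
    cases cur <;> simp [pvGoA, pvRuns, pvFlush, pvSel]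
  | cons x xs ih =>
    intro res cur
    cases hk : PySem.Str.startswith x "i-" with
    | true =>
      have hk' : PySem.Chars.startswith x.toList ['i', '-'] = true := by simpa using hk
      rw [show pvGoA (x :: xs) res cur = pvGoA xs res (cur ++ [x]) by simp [pvGoA, hk']]
      rw [ih]
      congr 1
      rcases hr : pvRuns xs with _ | ⟨⟨k', g⟩, rest⟩
      · simp [pvRuns, hr, hk', pvFlush, pvSel]
      · cases k' <;> cases cur <;> simp [pvRuns, hr, hk', pvFlush, pvSel]
    | false =>
      have hk' : PySem.Chars.startswith x.toList ['i', '-'] = false := by simpa using hk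
      rw [show pvGoA (x :: xs) res cur
          = pvGoA xs (if cur.length > 0 then res ++ [cur] else res) [] by simp [pvGoA, hk']]
      rw [ih, pvFlush_nil]
      have hsel : pvFlush cur (pvRuns (x :: xs))
          = (if cur.length > 0 then [cur] else []) ++ pvSel (pvRuns xs) := by
        rcases hr : pvRuns xs with _ | ⟨⟨k', g⟩, rest⟩
        · cases cur <;> simp [pvRuns, hr, hk', pvFlush, pvSel]
        · cases k' <;> cases cur <;> simp [pvRuns, hr, hk', pvFlush, pvSel]
      rw [hsel]
      cases cur <;> simp [pvSel]

-- the key of the first run is the flag of the head element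
lemma pvRuns_cons (x : String) (xs : List String) :
    ∃ g rest, pvRuns (x :: xs) = (PySem.Chars.startswith x.toList ['i', '-'], g) :: rest := by
  rcases hr : pvRuns xs with _ | ⟨⟨k', g⟩, rest⟩
  · exact ⟨[x], [], by simp [pvRuns, hr, PySem.Str.startswith]⟩
  · by_cases h : k' = PySem.Chars.startswith x.toList ['i', '-']
    · exact ⟨x :: g, rest, by simp [pvRuns, hr, PySem.Str.startswith, h]⟩
    · exact ⟨[x], (k', g) :: rest, by simp [pvRuns, hr, PySem.Str.startswith, h]⟩

-- invariant of B's reversed foldl: run_open = flag of the head of xs, result = selected runs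
lemma foldl_stepB_eq (xs : List String) :
    xs.reverse.foldl pvStepB (false, []) =
      ((match xs with | [] => false | y :: _ => PySem.Str.startswith y "i-"),
       pvSel (pvRuns xs)) := by
  induction xs with
  | nil => simp [pvRuns, pvSel]
  | cons x xs ih =>
    have hstep : (x :: xs).reverse.foldl pvStepB (false, [])
        = pvStepB (xs.reverse.foldl pvStepB (false, [])) x := by
      simp [List.reverse_cons, List.foldl_append]
    rw [hstep, ih]
    cases hk : PySem.Chars.startswith x.toList ['i', '-'] with
    | false =>
      rcases hr : pvRuns xs with _ | ⟨⟨k', g⟩, rest⟩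
      · simp [pvStepB, PySem.Str.startswith, hk, pvRuns, hr, pvSel]
      · cases k' <;> simp [pvStepB, PySem.Str.startswith, hk, pvRuns, hr, pvSel]
    | true =>
      cases xs with
      | nil => simp [pvStepB, PySem.Str.startswith, hk, pvRuns, pvSel]
      | cons y ys =>
        obtain ⟨g, rest, hr⟩ := pvRuns_cons y ys
        cases hy : PySem.Chars.startswith y.toList ['i', '-'] with
        | true =>
          rw [hy] at hr
          have hxr : pvRuns (x :: y :: ys) = (true, x :: g) :: rest := by
            rw [pvRuns, hr]; simp [PySem.Str.startswith, hk]
          simp [pvStepB, PySem.Str.startswith, hk, hy, hr, hxr, pvSel]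
        | false =>
          rw [hy] at hr
          have hxr : pvRuns (x :: y :: ys) = (true, [x]) :: (false, g) :: rest := by
            rw [pvRuns, hr]; simp [PySem.Str.startswith, hk]
          simp [pvStepB, PySem.Str.startswith, hk, hy, hr, hxr, pvSel]

-- ===== VERDICT (by name: the statement is the Claim_ definition above) =====
theorem get_inst_from_input_seq_spec : Claim_equal_get_inst_from_input_seq := by
  intro inp_seq _
  show pvGoA inp_seq [] [] = _
  rw [pvGoA_eq, pvFlush_nil]
  unfold get_inst_from_input_seq_alt
  rw [foldl_stepB_eq]
  simp
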